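-- pv_equiv track=rewrite | github.com/tal-tech/visual_depiction_detection | module/help_data.py | compare_2list
-- ===== SOURCE A (Python) =====
-- def compare_2list(indexflag_bz, indexflag_yc):
--     '''
--     比较两个BIO列表
--     :param indexflag_bz: 标注
--     :param indexflag_yb: 预测
--     :return: bz,pr,hit
--     '''
--     bz = 0
--     pr = 0
--     hit = 0
--     assert len(indexflag_bz) == len(indexflag_yc)
--
--     for i in range(len(indexflag_bz)):
--         if indexflag_bz[i] != "O":
--             bz += 1
--
--         if indexflag_yc[i] != "O":
--             pr += 1
--
--             if indexflag_bz[i] == indexflag_yc[i]: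
--                 hit += 1
--
--     return [bz,pr,hit]
-- ===== SOURCE B (Python) =====
-- def compare_2list(indexflag_bz, indexflag_yc):
--     '''
--     比较两个BIO列表
--     :param indexflag_bz: 标注
--     :param indexflag_yb: 预测
--     :return: bz,pr,hit
--     '''
--     assert len(indexflag_bz) == len(indexflag_yc)
--     bz = sum(1 for x in indexflag_bz if x != "O")
--     pr = sum(1 for x in indexflag_yc if x != "O")
--     hit = sum(1 for a, b in zip(indexflag_bz, indexflag_yc) if b != "O" and a == b)
--     return [bz, pr, hit]
-- ===== Notes on version B (the rewrite author's own statement) =====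
-- stated objective: simpler
-- what changed: Replaces the single index loop with a nested branch and three mutable counters by three independent sum-comprehension passes (two over each list, one over their zip).
import Mathlib
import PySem

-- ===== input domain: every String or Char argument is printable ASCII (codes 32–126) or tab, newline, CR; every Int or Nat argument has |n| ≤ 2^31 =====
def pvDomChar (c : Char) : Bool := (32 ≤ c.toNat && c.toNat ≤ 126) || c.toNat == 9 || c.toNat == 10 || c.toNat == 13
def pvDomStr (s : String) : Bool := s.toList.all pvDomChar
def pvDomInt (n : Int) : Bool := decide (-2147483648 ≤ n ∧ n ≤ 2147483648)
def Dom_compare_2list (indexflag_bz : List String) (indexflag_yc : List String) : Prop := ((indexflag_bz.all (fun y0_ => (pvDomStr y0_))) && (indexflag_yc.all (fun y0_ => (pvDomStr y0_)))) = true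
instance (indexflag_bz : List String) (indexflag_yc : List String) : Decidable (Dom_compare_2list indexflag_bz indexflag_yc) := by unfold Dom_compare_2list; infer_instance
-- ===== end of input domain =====

-- B replaces A's single fused index loop (three mutable counters, nested branch) by
-- three independent passes: objective 'simpler'.

-- ===== PORT A =====
-- Literal port of A: index loop over range(len), three counters in one state triple.
def compare_2list (indexflag_bz : List String) (indexflag_yc : List String) : List Int :=
  let s := (PySem.List.pyRange 0 (PySem.List.len indexflag_bz) 1).foldl
    (fun (s : Int × Int × Int) i =>
      let s := if PySem.List.pyGetD indexflag_bz i "" ≠ "O" then (s.1 + 1, s.2.1, s.2.2) else s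
      if PySem.List.pyGetD indexflag_yc i "" ≠ "O" then
        if PySem.List.pyGetD indexflag_bz i "" = PySem.List.pyGetD indexflag_yc i ""
        then (s.1, s.2.1 + 1, s.2.2 + 1)
        else (s.1, s.2.1 + 1, s.2.2)
      else s)
    (0, 0, 0)
  [s.1, s.2.1, s.2.2]

-- ===== PORT B =====
-- Literal port of B: three separate count passes (sum of 1s = countP).
def compare_2list_alt (indexflag_bz : List String) (indexflag_yc : List String) : List Int :=
  [ ((indexflag_bz.countP (fun x => x != "O") : Nat) : Int),
    ((indexflag_yc.countP (fun x => x != "O") : Nat) : Int),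
    (((indexflag_bz.zip indexflag_yc).countP (fun p => p.2 != "O" && p.1 == p.2) : Nat) : Int) ]

-- ===== PRECONDITION & SPEC =====
-- A's assert raises AssertionError when the two lists differ in length; Pre_ excludes exactly that.
def Pre_compare_2list (indexflag_bz : List String) (indexflag_yc : List String) : Prop :=
  indexflag_bz.length = indexflag_yc.length
instance (indexflag_bz : List String) (indexflag_yc : List String) : Decidable (Pre_compare_2list indexflag_bz indexflag_yc) := by unfold Pre_compare_2list; infer_instance
def pvWitness_compare_2list : List String × List String := (["B", "O", "I"], ["B", "B", "O"])

def Spec_compare_2list (indexflag_bz : List String) (indexflag_yc : List String) (out : List Int) : Prop := out = compare_2list_alt indexflag_bz indexflag_yc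
instance (indexflag_bz : List String) (indexflag_yc : List String) (out : List Int) : Decidable (Spec_compare_2list indexflag_bz indexflag_yc out) := by unfold Spec_compare_2list; infer_instance

-- ===== CLAIM (what is proved, stated in full; the proofs are below) =====
def Claim_equal_compare_2list : Prop := ∀ (indexflag_bz : List String) (indexflag_yc : List String), Dom_compare_2list indexflag_bz indexflag_yc → Pre_compare_2list indexflag_bz indexflag_yc → Spec_compare_2list indexflag_bz indexflag_yc (compare_2list indexflag_bz indexflag_yc)

-- ===== LEMMAS AND PROOFS =====

-- An index loop reading both lists at position k is a fold over their zip (equal lengths).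
theorem foldl_range_getD_zip {α β : Type} (g : β → α → α → β) (d : α) :
    ∀ (xs ys : List α) (init : β), xs.length = ys.length →
      (List.range xs.length).foldl (fun s k => g s (xs.getD k d) (ys.getD k d)) init
        = (xs.zip ys).foldl (fun s p => g s p.1 p.2) init := by
  intro xs
  induction xs with
  | nil => intro ys init h; simp
  | cons x xs ih =>
    intro ys init h
    cases ys with
    | nil => simp at h
    | cons y ys =>
      simp only [List.length_cons, List.range_succ_eq_map, List.foldl_cons, List.foldl_map,
        List.getD_cons_zero, List.getD_cons_succ, List.zip_cons_cons]
      exact ih ys (g init x y) (by simpa using h)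

-- A's loop body, folded over any list of pairs, adds the three counts to the accumulators.
theorem foldl_body_counts :
    ∀ (l : List (String × String)) (a b c : Int),
      l.foldl (fun (s : Int × Int × Int) p =>
          let s := if p.1 ≠ "O" then (s.1 + 1, s.2.1, s.2.2) else s
          if p.2 ≠ "O" then
            if p.1 = p.2 then (s.1, s.2.1 + 1, s.2.2 + 1) else (s.1, s.2.1 + 1, s.2.2)
          else s) (a, b, c)
        = (a + l.countP (fun p => p.1 != "O"),
           b + l.countP (fun p => p.2 != "O"),
           c + l.countP (fun p => p.2 != "O" && p.1 == p.2)) := by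
  intro l
  induction l with
  | nil => intro a b c; simp
  | cons p l ih =>
    intro a b c
    rw [List.foldl_cons]
    simp only []
    split_ifs <;> rw [ih] <;>
      simp_all [List.countP_cons, Prod.ext_iff] <;>
      omega

-- ===== VERDICT (by name: the statement is the Claim_ definition above) =====
theorem compare_2list_spec : Claim_equal_compare_2list := by
  intro bz yc _ hpre
  unfold Spec_compare_2list compare_2list compare_2list_alt
  have hlen : PySem.List.len bz = (bz.length : Int) := by simp [PySem.List.len_eq]
  rw [hlen, PySem.List.pyRange_zero_nat]
  rw [List.foldl_map]
  simp only [PySem.List.pyGetD_natCast]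
  rw [foldl_range_getD_zip (fun (s : Int × Int × Int) u v =>
        let s := if u ≠ "O" then (s.1 + 1, s.2.1, s.2.2) else s
        if v ≠ "O" then
          if u = v then (s.1, s.2.1 + 1, s.2.2 + 1) else (s.1, s.2.1 + 1, s.2.2)
        else s) "" bz yc (0, 0, 0) hpre]
  rw [foldl_body_counts]
  have hfst : (bz.zip yc).map Prod.fst = bz := List.map_fst_zip (le_of_eq hpre)
  have hsnd : (bz.zip yc).map Prod.snd = yc := List.map_snd_zip (le_of_eq hpre.symm)
  have c1 : bz.countP (fun x => x != "O") = (bz.zip yc).countP (fun p => p.1 != "O") := by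
    conv_lhs => rw [← hfst]
    rw [List.countP_map]; rfl
  have c2 : yc.countP (fun x => x != "O") = (bz.zip yc).countP (fun p => p.2 != "O") := by
    conv_lhs => rw [← hsnd]
    rw [List.countP_map]; rfl
  simp [c1, c2]
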